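-- pv_equiv track=rewrite | github.com/asweigart/programmedpatterns | book/visualpatterns.py | formula70
-- ===== SOURCE A (Python) =====
-- def formula70(step):
--     width = 3
--     height = 3
--     for i in range(2, step + 1):
--         if i % 2 == 0:
--             height += 2
--         elif i % 2 == 1:
--             width += 2
--             height += 1
--     return width * height
-- ===== SOURCE B (Python) =====
-- def formula70(step):
--     # closed form: the loop adds 2 to height per even i and (2,1) to (width,height)
--     # per odd i in range(2, step+1); count them arithmetically instead.
--     n = step - 1 if step >= 2 else 0      # number of iterations
--     e = step // 2 if step >= 2 else 0     # evens in [2, step]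
--     o = n - e                             # odds in [3, step]
--     return (3 + 2 * o) * (3 + 2 * e + o)
-- ===== Notes on version B (the rewrite author's own statement) =====
-- stated objective: faster
-- what changed: Replaces the O(step) loop with an O(1) closed form counting even and odd iterations in [2, step] arithmetically.
import Mathlib
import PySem

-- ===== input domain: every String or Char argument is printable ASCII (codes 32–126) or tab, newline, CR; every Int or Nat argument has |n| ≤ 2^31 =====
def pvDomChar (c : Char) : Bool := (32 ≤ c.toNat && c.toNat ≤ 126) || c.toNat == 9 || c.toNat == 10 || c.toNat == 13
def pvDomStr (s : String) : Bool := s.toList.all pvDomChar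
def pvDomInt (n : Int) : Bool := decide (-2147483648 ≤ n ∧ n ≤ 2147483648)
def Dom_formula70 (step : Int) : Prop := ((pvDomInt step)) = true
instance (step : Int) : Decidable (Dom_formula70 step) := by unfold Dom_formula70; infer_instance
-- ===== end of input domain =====

-- B replaces A's O(step) loop with an O(1) closed form counting even/odd iterations.

-- ===== PORT A =====
def formula70 (step : Int) : Int :=
  let wh := (PySem.List.pyRange 2 (step + 1) 1).foldl
    (fun (wh : Int × Int) i =>
      if PySem.Int.mod i 2 = 0 then (wh.1, wh.2 + 2)
      else if PySem.Int.mod i 2 = 1 then (wh.1 + 2, wh.2 + 1)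
      else wh)
    (3, 3)
  wh.1 * wh.2

-- ===== PORT B =====
def formula70_alt (step : Int) : Int :=
  let n : Int := if step ≥ 2 then step - 1 else 0
  let e : Int := if step ≥ 2 then PySem.Int.floordiv step 2 else 0
  let o : Int := n - e
  (3 + 2 * o) * (3 + 2 * e + o)

-- ===== PRECONDITION & SPEC =====
def Spec_formula70 (step : Int) (out : Int) : Prop := out = formula70_alt step
instance (step : Int) (out : Int) : Decidable (Spec_formula70 step out) := by unfold Spec_formula70; infer_instance

-- ===== CLAIM (what is proved, stated in full; the proofs are below) =====
def Claim_equal_formula70 : Prop := ∀ (step : Int), Dom_formula70 step → Spec_formula70 step (formula70 step)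

-- ===== LEMMAS AND PROOFS =====

def pvBody : Int × Int → Int → Int × Int :=
  fun wh i =>
    if PySem.Int.mod i 2 = 0 then (wh.1, wh.2 + 2)
    else if PySem.Int.mod i 2 = 1 then (wh.1 + 2, wh.2 + 1)
    else wh

theorem pvLoop_closed (b : Int) (hb : 2 ≤ b) :
    (PySem.List.pyRange 2 (b + 1) 1).foldl pvBody (3, 3)
      = (3 + 2 * ((b - 1) - b / 2), 3 + 2 * (b / 2) + ((b - 1) - b / 2)) := by
  induction b, hb using Int.le_induction with
  | base =>
      norm_num [PySem.List.pyRange_one_cons (by norm_num : (2:Int) < 3),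
        PySem.List.pyRange_one_eq_nil (by norm_num : (3:Int) ≤ 3), pvBody, PySem.Int.mod]
  | succ b hb ih =>
      rw [show b + 1 + 1 = (b + 1) + 1 from rfl,
        PySem.List.pyRange_one_succ_right (by omega), List.foldl_append, ih]
      simp only [List.foldl, pvBody, PySem.Int.mod_eq_emod_of_pos (a := b + 1) (b := 2) (by norm_num)]
      rcases Int.emod_two_eq_zero_or_one (b + 1) with h | h <;>
        simp only [h] <;> norm_num <;> constructor <;> omega

theorem formula70_spec : Claim_equal_formula70 := by
  intro step _
  unfold Spec_formula70 formula70 formula70_alt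
  by_cases h : 2 ≤ step
  · have := pvLoop_closed step h
    simp only [show (fun (wh : Int × Int) i =>
      if PySem.Int.mod i 2 = 0 then (wh.1, wh.2 + 2)
      else if PySem.Int.mod i 2 = 1 then (wh.1 + 2, wh.2 + 1)
      else wh) = pvBody from rfl, this]
    rw [PySem.Int.floordiv_eq_ediv_of_pos (by norm_num)]
    simp [h, ge_iff_le]
  · rw [PySem.List.pyRange_one_eq_nil (by omega)]
    simp [List.foldl, show ¬ step ≥ 2 from h]
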